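-- pv_equiv track=rewrite | github.com/AlexB-B/DeePyMoD_torch_AlexVersion | src/deepymod_torch/sparsity.py | check_need_overide
-- ===== SOURCE A (Python) =====
-- def check_need_overide(sparsity_mask_trial, original_diff_order):
--     Index_Gap = original_diff_order+1
--
--     #First check zeroth and first derivatives are present. In no model is there ever the situation where either of these should  be removed, except for a single spring
--     for coeff_index in [0, Index_Gap-1, Index_Gap]:
--         if not coeff_index in sparsity_mask_trial:
--             return True
--
--     #Next check if all pairs are like
--     for coeff_index in range(1, original_diff_order):
--         if (coeff_index in sparsity_mask_trial) != (coeff_index+Index_Gap in sparsity_mask_trial):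
--             return True
--
--     #Next check that no derivatives skipped
--     Expected_State = False
--     for coeff_index in range(1, original_diff_order):
--         if (coeff_index in sparsity_mask_trial) == Expected_State:
--             if Expected_State == True:
--                 return True
--
--             Expected_State = True
--
--     return False
-- ===== SOURCE B (Python) =====
-- def check_need_overide(sparsity_mask_trial, original_diff_order):
--     gap = original_diff_order + 1
--     present = set(sparsity_mask_trial)
--     low = set()
--     high = set()
--     for x in sparsity_mask_trial:
--         if 1 <= x < original_diff_order:
--             low.add(x)
--         elif gap + 1 <= x < gap + original_diff_order:
--             high.add(x - gap)
--     ok = ({0, gap - 1, gap} <= present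
--           and low == high
--           and low == set(range(1, len(low) + 1)))
--     return not ok
-- ===== Notes on version B (the rewrite author's own statement) =====
-- stated objective: alternative
-- what changed: A scans index ranges with three early-return loops (each a linear membership scan of the mask, plus an Expected_State state machine); B makes one pass over the mask itself, partitioning its elements into a set of present low indices and a set of shifted high indices, then decides everything with three set comparisons (subset, set equality, contiguous-prefix-as-set) - it trades A's early returns for a data-driven single pass.
import Mathlib
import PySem

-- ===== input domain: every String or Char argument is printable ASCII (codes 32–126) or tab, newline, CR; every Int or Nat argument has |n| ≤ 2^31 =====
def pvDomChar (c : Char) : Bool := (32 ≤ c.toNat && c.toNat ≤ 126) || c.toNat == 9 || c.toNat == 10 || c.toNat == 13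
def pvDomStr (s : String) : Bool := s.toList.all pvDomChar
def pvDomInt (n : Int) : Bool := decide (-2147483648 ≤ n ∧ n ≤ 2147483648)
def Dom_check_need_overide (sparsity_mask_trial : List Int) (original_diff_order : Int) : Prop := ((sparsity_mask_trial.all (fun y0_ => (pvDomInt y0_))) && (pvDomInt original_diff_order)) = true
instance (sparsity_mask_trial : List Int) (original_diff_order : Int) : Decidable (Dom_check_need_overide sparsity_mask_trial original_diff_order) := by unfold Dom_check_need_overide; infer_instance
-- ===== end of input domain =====

-- B replaces A's three early-return scans over index ranges (incl. the Expected_State state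
-- machine) by ONE pass over the mask itself, partitioning its elements into the set of present
-- low indices and the set of (shifted) high indices, followed by three set comparisons;
-- objective: alternative decomposition, same behaviour on all inputs (both are total).

-- ===== PORT A =====
-- first loop: for coeff_index in [0, Index_Gap-1, Index_Gap]: if not in mask: return True
def aLoop1 (m : List Int) : List Int → Bool
  | [] => false
  | c :: rest => if !(m.contains c) then true else aLoop1 m rest

-- second loop: pairs check with early return
def aLoop2 (m : List Int) (gap : Int) : List Int → Bool
  | [] => false
  | c :: rest =>
      if (m.contains c) != (m.contains (c + gap)) then true else aLoop2 m gap rest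

-- third loop: the Expected_State state machine with early return
def aLoop3 (m : List Int) (es : Bool) : List Int → Bool
  | [] => false
  | c :: rest =>
      if m.contains c == es then
        (if es then true else aLoop3 m true rest)
      else aLoop3 m es rest

def check_need_overide (sparsity_mask_trial : List Int) (original_diff_order : Int) : Bool :=
  if aLoop1 sparsity_mask_trial [0, original_diff_order + 1 - 1, original_diff_order + 1] then true
  else if aLoop2 sparsity_mask_trial (original_diff_order + 1)
          (PySem.List.pyRange 1 original_diff_order 1) then true
  else aLoop3 sparsity_mask_trial false (PySem.List.pyRange 1 original_diff_order 1)

-- ===== PORT B =====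
-- one pass over the mask: partition its elements into the set of present low indices
-- ('low') and the set of shifted high indices ('high'); Python's set → PySem.Set
def check_need_overide_alt (sparsity_mask_trial : List Int) (original_diff_order : Int) : Bool :=
  let gap := original_diff_order + 1
  let present : PySem.Set Int := PySem.Set.ofList sparsity_mask_trial
  let lh : PySem.Set Int × PySem.Set Int :=
    sparsity_mask_trial.foldl
      (fun (p : PySem.Set Int × PySem.Set Int) x =>
        if 1 ≤ x ∧ x < original_diff_order then (PySem.Set.add p.1 x, p.2)
        else if gap + 1 ≤ x ∧ x < gap + original_diff_order then (p.1, PySem.Set.add p.2 (x - gap))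
        else p)
      (PySem.Set.empty, PySem.Set.empty)
  let ok := PySem.Set.issubset (PySem.Set.ofList [0, gap - 1, gap]) present
            && PySem.Set.equal lh.1 lh.2
            && PySem.Set.equal lh.1
                 (PySem.Set.ofList (PySem.List.pyRange 1 (PySem.Set.len lh.1 + 1) 1))
  !ok

-- ===== PRECONDITION & SPEC =====
def Spec_check_need_overide (sparsity_mask_trial : List Int) (original_diff_order : Int) (out : Bool) : Prop := out = check_need_overide_alt sparsity_mask_trial original_diff_order
instance (sparsity_mask_trial : List Int) (original_diff_order : Int) (out : Bool) : Decidable (Spec_check_need_overide sparsity_mask_trial original_diff_order out) := by unfold Spec_check_need_overide; infer_instance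

-- ===== CLAIM =====
def Claim_equal_check_need_overide : Prop := ∀ (sparsity_mask_trial : List Int) (original_diff_order : Int), Dom_check_need_overide sparsity_mask_trial original_diff_order → Spec_check_need_overide sparsity_mask_trial original_diff_order (check_need_overide sparsity_mask_trial original_diff_order)

-- ===== LEMMAS AND PROOFS =====

-- the consecutive integer list [a, a+1, ..., a+n-1]
def rl (a : Int) (n : Nat) : List Int := (List.range n).map (fun k : Nat => a + (k : Int))

lemma rl_succ (a : Int) (n : Nat) : rl a (n + 1) = a :: rl (a + 1) n := by
  simp only [rl, List.range_succ_eq_map, List.map_cons, List.map_map]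
  refine congrArg₂ _ (by simp) ?_
  apply List.map_congr_left; intro k _; simp [Function.comp]; ring

lemma mem_rl {a x : Int} {n : Nat} : x ∈ rl a n ↔ a ≤ x ∧ x < a + n := by
  simp only [rl, List.mem_map, List.mem_range]
  constructor
  · rintro ⟨k, hk, rfl⟩
    constructor
    · omega
    · have : (k : Int) < (n : Int) := by exact_mod_cast hk
      omega
  · rintro ⟨h1, h2⟩
    refine ⟨(x - a).toNat, ?_, ?_⟩ <;> omega

lemma pairwise_rl (a : Int) (n : Nat) : (rl a n).Pairwise (· < ·) := by
  induction n generalizing a with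
  | zero => simp [rl]
  | succ n ih =>
      rw [rl_succ]
      refine List.Pairwise.cons ?_ (ih (a + 1))
      intro x hx
      have := (mem_rl.mp hx).1
      omega

lemma pyRange_eq_rl (a b : Int) : PySem.List.pyRange a b 1 = rl a (b - a).toNat := by
  rw [PySem.List.pyRange_one]; simp [rl]

lemma aLoop1_eq_any (m : List Int) (cs : List Int) :
    aLoop1 m cs = cs.any (fun c => !(m.contains c)) := by
  induction cs with
  | nil => rfl
  | cons c rest ih =>
      simp only [aLoop1, List.any_cons]
      cases m.contains c <;> simp [ih]

lemma aLoop2_eq_any (m : List Int) (gap : Int) (r : List Int) :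
    aLoop2 m gap r = r.any (fun c => (m.contains c) != (m.contains (c + gap))) := by
  induction r with
  | nil => rfl
  | cons c rest ih =>
      simp only [aLoop2, List.any_cons]
      cases h : ((m.contains c) != (m.contains (c + gap))) with
      | true => simp
      | false => simp only [Bool.false_or, if_neg Bool.false_ne_true]; exact ih

lemma aLoop3_true_eq_any (m : List Int) (r : List Int) :
    aLoop3 m true r = r.any (fun c => m.contains c) := by
  induction r with
  | nil => rfl
  | cons c rest ih =>
      simp only [aLoop3, List.any_cons]
      cases m.contains c with
      | true => simp
      | false => simp only [Bool.false_or, beq_iff_eq, if_neg Bool.false_ne_true]; exact ih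

-- the Expected_State machine equals the contiguous-prefix list comparison on the filter
lemma aLoop3_key (m : List Int) : ∀ (n : Nat) (a : Int),
    aLoop3 m false (rl a n)
      = !(((rl a n).filter (fun i => m.contains i))
            == rl a ((rl a n).filter (fun i => m.contains i)).length) := by
  intro n
  induction n with
  | zero => intro a; simp [rl, aLoop3]
  | succ n ih =>
      intro a
      rw [rl_succ]
      cases hc : m.contains a with
      | true =>
          have ham : a ∈ m := by simpa using hc
          have hA : aLoop3 m false (a :: rl (a + 1) n) = aLoop3 m false (rl (a + 1) n) := by
            simp [aLoop3, ham]
          have hfil : (a :: rl (a + 1) n).filter (fun i => m.contains i)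
              = a :: (rl (a + 1) n).filter (fun i => m.contains i) := by
            simp [ham]
          rw [hA, hfil, List.length_cons, rl_succ, ih (a + 1)]
          simp
      | false =>
          have ham : a ∉ m := by simpa using hc
          have hA : aLoop3 m false (a :: rl (a + 1) n) = aLoop3 m true (rl (a + 1) n) := by
            simp [aLoop3, ham]
          have hfil : (a :: rl (a + 1) n).filter (fun i => m.contains i)
              = (rl (a + 1) n).filter (fun i => m.contains i) := by
            simp [ham]
          rw [hA, hfil, aLoop3_true_eq_any]
          cases hF : ((rl (a + 1) n).filter (fun i => m.contains i)) with
          | nil =>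
              have hno : (rl (a + 1) n).any (fun c => m.contains c) = false := by
                rw [List.any_eq_false]
                intro x hx
                have := List.filter_eq_nil_iff.mp hF x hx
                simpa using this
              rw [hno]
              simp [rl]
          | cons x xs =>
              have hxmem : x ∈ (rl (a + 1) n).filter (fun i => m.contains i) := by
                rw [hF]; exact List.mem_cons_self
              have hx : x ∈ rl (a + 1) n := List.mem_of_mem_filter hxmem
              have px : m.contains x = true := by
                have := List.mem_filter.mp hxmem
                simpa using this.2
              have hax : a + 1 ≤ x := (mem_rl.mp hx).1
              have hany : (rl (a + 1) n).any (fun c => m.contains c) = true :=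
                List.any_eq_true.mpr ⟨x, hx, px⟩
              rw [hany]
              rw [List.length_cons, rl_succ]
              have hxa : (x == a) = false := by
                simp only [beq_eq_false_iff_ne]; omega
              simp [List.cons_beq_cons, hxa]

-- the conditional-add fold: membership and nodup (covers both components of B's pass)
lemma mem_foldl_addif {P : Int → Prop} [DecidablePred P] {f : Int → Int}
    (l : List Int) (s : PySem.Set Int) (y : Int) :
    (y ∈ l.foldl (fun s x => if P x then PySem.Set.add s (f x) else s) s)
      ↔ y ∈ s ∨ ∃ x ∈ l, P x ∧ y = f x := by
  induction l generalizing s with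
  | nil => simp
  | cons x rest ih =>
      simp only [List.foldl_cons]
      by_cases hp : P x
      · rw [if_pos hp, ih, PySem.Set.mem_add]
        constructor
        · rintro (⟨h | h⟩ | ⟨z, hz, hpz, rfl⟩)
          · exact Or.inl h
          · exact Or.inr ⟨x, List.mem_cons_self, hp, h⟩
          · exact Or.inr ⟨z, List.mem_cons_of_mem _ hz, hpz, rfl⟩
        · rintro (h | ⟨z, hz, hpz, rfl⟩)
          · exact Or.inl (Or.inl h)
          · rcases List.mem_cons.mp hz with rfl | hz'
            · exact Or.inl (Or.inr rfl)
            · exact Or.inr ⟨z, hz', hpz, rfl⟩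
      · rw [if_neg hp, ih]
        constructor
        · rintro (h | ⟨z, hz, hpz, rfl⟩)
          · exact Or.inl h
          · exact Or.inr ⟨z, List.mem_cons_of_mem _ hz, hpz, rfl⟩
        · rintro (h | ⟨z, hz, hpz, rfl⟩)
          · exact Or.inl h
          · rcases List.mem_cons.mp hz with rfl | hz'
            · exact absurd hpz hp
            · exact Or.inr ⟨z, hz', hpz, rfl⟩

lemma nodup_foldl_addif {P : Int → Prop} [DecidablePred P] {f : Int → Int}
    (l : List Int) (s : PySem.Set Int) (hs : s.Nodup) :
    (l.foldl (fun s x => if P x then PySem.Set.add s (f x) else s) s).Nodup := by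
  induction l generalizing s with
  | nil => exact hs
  | cons x rest ih =>
      simp only [List.foldl_cons]
      by_cases hp : P x
      · rw [if_pos hp]; exact ih _ (PySem.Set.nodup_add _ _ hs)
      · rw [if_neg hp]; exact ih _ hs

-- B's pass splits into two independent conditional-add folds
lemma bFold_fst (odo gap : Int) (l : List Int) (s t : PySem.Set Int) :
    (l.foldl
      (fun (p : PySem.Set Int × PySem.Set Int) x =>
        if 1 ≤ x ∧ x < odo then (PySem.Set.add p.1 x, p.2)
        else if gap + 1 ≤ x ∧ x < gap + odo then (p.1, PySem.Set.add p.2 (x - gap))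
        else p) (s, t)).1
      = l.foldl (fun s x => if 1 ≤ x ∧ x < odo then PySem.Set.add s x else s) s := by
  induction l generalizing s t with
  | nil => rfl
  | cons x rest ih =>
      simp only [List.foldl_cons]
      by_cases h1 : 1 ≤ x ∧ x < odo
      · rw [if_pos h1, if_pos h1]; exact ih _ _
      · rw [if_neg h1, if_neg h1]
        by_cases h2 : gap + 1 ≤ x ∧ x < gap + odo
        · rw [if_pos h2]; exact ih _ _
        · rw [if_neg h2]; exact ih _ _

lemma bFold_snd (odo gap : Int) (l : List Int) (s t : PySem.Set Int) :
    (l.foldl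
      (fun (p : PySem.Set Int × PySem.Set Int) x =>
        if 1 ≤ x ∧ x < odo then (PySem.Set.add p.1 x, p.2)
        else if gap + 1 ≤ x ∧ x < gap + odo then (p.1, PySem.Set.add p.2 (x - gap))
        else p) (s, t)).2
      = l.foldl (fun t x => if (¬(1 ≤ x ∧ x < odo)) ∧ gap + 1 ≤ x ∧ x < gap + odo
          then PySem.Set.add t (x - gap) else t) t := by
  induction l generalizing s t with
  | nil => rfl
  | cons x rest ih =>
      simp only [List.foldl_cons]
      by_cases h1 : 1 ≤ x ∧ x < odo
      · rw [if_pos h1, if_neg (by tauto : ¬((¬(1 ≤ x ∧ x < odo)) ∧ gap + 1 ≤ x ∧ x < gap + odo))]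
        exact ih _ _
      · rw [if_neg h1]
        by_cases h2 : gap + 1 ≤ x ∧ x < gap + odo
        · rw [if_pos h2, if_pos (⟨h1, h2⟩ : (¬(1 ≤ x ∧ x < odo)) ∧ gap + 1 ≤ x ∧ x < gap + odo)]
          exact ih _ _
        · rw [if_neg h2, if_neg (by tauto : ¬((¬(1 ≤ x ∧ x < odo)) ∧ gap + 1 ≤ x ∧ x < gap + odo))]
          exact ih _ _

-- the main equivalence
lemma main_eq (m : List Int) (odo : Int) :
    check_need_overide m odo = check_need_overide_alt m odo := by
  simp only [check_need_overide, check_need_overide_alt]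
  set gap := odo + 1 with hgap
  set n := (odo - 1).toNat with hn
  -- the two components of B's single pass
  set low := (m.foldl
      (fun (p : PySem.Set Int × PySem.Set Int) x =>
        if 1 ≤ x ∧ x < odo then (PySem.Set.add p.1 x, p.2)
        else if gap + 1 ≤ x ∧ x < gap + odo then (p.1, PySem.Set.add p.2 (x - gap))
        else p) (PySem.Set.empty, PySem.Set.empty)).1 with hlowdef
  set high := (m.foldl
      (fun (p : PySem.Set Int × PySem.Set Int) x =>
        if 1 ≤ x ∧ x < odo then (PySem.Set.add p.1 x, p.2)
        else if gap + 1 ≤ x ∧ x < gap + odo then (p.1, PySem.Set.add p.2 (x - gap))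
        else p) (PySem.Set.empty, PySem.Set.empty)).2 with hhighdef
  have mem_low : ∀ y, y ∈ low ↔ y ∈ m ∧ 1 ≤ y ∧ y < odo := by
    intro y
    rw [hlowdef, bFold_fst, mem_foldl_addif (f := fun x => x)]
    simp only [PySem.Set.empty, List.not_mem_nil, false_or]
    constructor
    · rintro ⟨x, hx, hc, rfl⟩; exact ⟨hx, hc⟩
    · rintro ⟨hy, hc⟩; exact ⟨y, hy, hc, rfl⟩
  have mem_high : ∀ y, y ∈ high ↔ y + gap ∈ m ∧ 1 ≤ y ∧ y < odo := by
    intro y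
    rw [hhighdef, bFold_snd, mem_foldl_addif (f := fun x => x - gap)]
    simp only [PySem.Set.empty, List.not_mem_nil, false_or]
    constructor
    · rintro ⟨x, hx, ⟨-, hb1, hb2⟩, rfl⟩
      refine ⟨by simpa using hx, by omega, by omega⟩
    · rintro ⟨hy, h1, h2⟩
      exact ⟨y + gap, hy, ⟨by omega, by omega, by omega⟩, by ring⟩
  have nodup_low : low.Nodup := by
    rw [hlowdef, bFold_fst]
    exact nodup_foldl_addif (f := fun x => x) _ _ List.nodup_nil
  -- range list and its filter (A's third loop works on these)
  have hR : PySem.List.pyRange 1 odo 1 = rl 1 n := by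
    rw [pyRange_eq_rl]
  set F := (rl 1 n).filter (fun i => m.contains i) with hF
  have mem_F : ∀ y, y ∈ F ↔ y ∈ m ∧ 1 ≤ y ∧ y < odo := by
    intro y
    rw [hF, List.mem_filter, mem_rl]
    constructor
    · rintro ⟨⟨h1, h2⟩, hc⟩
      exact ⟨by simpa using hc, h1, by omega⟩
    · rintro ⟨hy, h1, h2⟩
      exact ⟨⟨h1, by omega⟩, by simpa using hy⟩
  have pairwise_F : F.Pairwise (· < ·) := (pairwise_rl 1 n).filter _
  have nodup_F : F.Nodup := pairwise_F.imp (fun h => ne_of_lt h)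
  have perm_low_F : low.Perm F :=
    (List.perm_ext_iff_of_nodup nodup_low nodup_F).mpr (fun y => by rw [mem_low, mem_F])
  have hlen : low.length = F.length := perm_low_F.length_eq
  -- each of B's three set tests is the negation of the matching A scan
  have h1 : PySem.Set.issubset (PySem.Set.ofList [0, gap - 1, gap]) (PySem.Set.ofList m)
      = !(aLoop1 m [0, gap - 1, gap]) := by
    rw [aLoop1_eq_any]
    rcases Bool.eq_false_or_eq_true ([0, gap - 1, gap].any (fun c => !(m.contains c))) with ha | ha
    · rw [ha, Bool.not_true]
      obtain ⟨c, hc, hcc⟩ := List.any_eq_true.mp ha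
      apply Bool.eq_false_iff.mpr
      intro hsub
      have hcm := (PySem.Set.issubset_iff _ _).mp hsub c ((PySem.Set.mem_ofList _ _).mpr hc)
      have : c ∈ m := (PySem.Set.mem_ofList _ _).mp hcm
      simp [this] at hcc
    · rw [ha, Bool.not_false]
      simp only [List.any_eq_false] at ha
      apply (PySem.Set.issubset_iff _ _).mpr
      intro x hx
      have hx' : x ∈ ([0, gap - 1, gap] : List Int) := (PySem.Set.mem_ofList _ _).mp hx
      have := ha x hx'
      exact (PySem.Set.mem_ofList _ _).mpr (by simpa using this)
  have h2 : PySem.Set.equal low high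
      = !(aLoop2 m gap (PySem.List.pyRange 1 odo 1)) := by
    rw [aLoop2_eq_any, hR]
    rcases Bool.eq_false_or_eq_true ((rl 1 n).any (fun c => (m.contains c) != (m.contains (c + gap)))) with ha | ha
    · rw [ha, Bool.not_true]
      obtain ⟨c, hc, hcc⟩ := List.any_eq_true.mp ha
      obtain ⟨hc1, hc2⟩ := mem_rl.mp hc
      apply Bool.eq_false_iff.mpr
      intro heq
      have hiff := (PySem.Set.equal_iff _ _).mp heq c
      rw [mem_low, mem_high] at hiff
      have hmem : c ∈ m ↔ c + gap ∈ m := by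
        constructor
        · intro h; exact (hiff.mp ⟨h, hc1, by omega⟩).1
        · intro h; exact (hiff.mpr ⟨h, hc1, by omega⟩).1
      have hce : m.contains c = m.contains (c + gap) := by
        by_cases hcm : c ∈ m
        · have := hmem.mp hcm; simp [hcm, this]
        · have hno : c + gap ∉ m := fun h => hcm (hmem.mpr h); simp [hcm, hno]
      rw [bne_iff_ne] at hcc
      exact hcc hce
    · rw [ha, Bool.not_false]
      simp only [List.any_eq_false] at ha
      apply (PySem.Set.equal_iff _ _).mpr
      intro y
      rw [mem_low, mem_high]
      constructor
      · rintro ⟨hy, hy1, hy2⟩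
        have hyr : y ∈ rl 1 n := mem_rl.mpr ⟨hy1, by omega⟩
        refine ⟨?_, hy1, hy2⟩
        have hac : m.contains y = m.contains (y + gap) := by
          have := ha y hyr; simpa using this
        have hgc : m.contains (y + gap) = true := by rw [← hac]; simpa using hy
        simpa using hgc
      · rintro ⟨hy, hy1, hy2⟩
        have hyr : y ∈ rl 1 n := mem_rl.mpr ⟨hy1, by omega⟩
        refine ⟨?_, hy1, hy2⟩
        have hac : m.contains y = m.contains (y + gap) := by
          have := ha y hyr; simpa using this
        have hgc : m.contains y = true := by rw [hac]; simpa using hy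
        simpa using hgc
  have h3 : PySem.Set.equal low
        (PySem.Set.ofList (PySem.List.pyRange 1 (PySem.Set.len low + 1) 1))
      = !(aLoop3 m false (PySem.List.pyRange 1 odo 1)) := by
    rw [hR, aLoop3_key m n 1, ← hF, Bool.not_not]
    have hRL : PySem.List.pyRange 1 (PySem.Set.len low + 1) 1 = rl 1 F.length := by
      rw [pyRange_eq_rl]
      congr 1
      simp only [PySem.Set.len, hlen]
      omega
    have nodup_rlF : (rl 1 F.length).Nodup :=
      (pairwise_rl 1 F.length).imp (fun h => ne_of_lt h)
    rw [hRL, PySem.Set.ofList_eq_self_of_nodup _ nodup_rlF]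
    rcases Bool.eq_false_or_eq_true (F == rl 1 F.length) with hb | hb
    · rw [hb]
      have hFe : F = rl 1 F.length := by simpa using hb
      apply (PySem.Set.equal_iff _ _).mpr
      intro y
      exact (mem_low y).trans ((mem_F y).symm.trans (hFe ▸ Iff.rfl))
    · rw [hb]
      apply Bool.eq_false_iff.mpr
      intro heq
      have hiff := (PySem.Set.equal_iff _ _).mp heq
      have permF : F.Perm (rl 1 F.length) :=
        (List.perm_ext_iff_of_nodup nodup_F nodup_rlF).mpr
          (fun y => ((mem_F y).trans (mem_low y).symm).trans (hiff y))
      have e1 : PySem.List.sorted F (fun x => x) = F :=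
        PySem.List.sorted_eq_of_perm_of_pairwise_lt F F (fun x => x) (List.Perm.refl F) pairwise_F
      have e2 : PySem.List.sorted F (fun x => x) = rl 1 F.length :=
        PySem.List.sorted_eq_of_perm_of_pairwise_lt F (rl 1 F.length) (fun x => x)
          permF.symm (pairwise_rl 1 F.length)
      have hFe : F = rl 1 F.length := e1.symm.trans e2
      exact absurd hFe (by simpa using hb)
  rw [h1, h2, h3]
  cases aLoop1 m [0, gap - 1, gap] with
  | true => simp
  | false =>
      cases aLoop2 m gap (PySem.List.pyRange 1 odo 1) with
      | true => simp
      | false => simp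

-- ===== VERDICT =====
theorem check_need_overide_spec : Claim_equal_check_need_overide := by
  intro m odo _
  unfold Spec_check_need_overide
  exact main_eq m odo
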